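-- pv_equiv track=rewrite | github.com/ampgu0519/Interview_Algo_Practice | Codewars/SimpleFun305/typist.py | typist
-- ===== SOURCE A (Python) =====
-- def typist(s):
--     upper = False
--     key_strokes = len(s)
--     for l in s:
--         if l.isupper() and not upper:
--             key_strokes += 1
--             upper = True
--         elif l.islower() and upper:
--             key_strokes +=1
--             upper = False
--     return key_strokes
-- ===== SOURCE B (Python) =====
-- _LOWER = 'abcdefghijklmnopqrstuvwxyz'
-- _TABLE = str.maketrans(_LOWER, ' ' * 26)
--
--
-- def typist(s):
--     # Run-counting instead of transition tracking: drop non-letters, blank out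
--     # the lowercase letters, and split on the blanks -- the pieces are exactly
--     # the maximal uppercase runs.  Each run needs caps-lock on and off again,
--     # except the final "off" when the text ends (letter-wise) in uppercase.
--     letters = ''.join(filter(str.isalpha, s))
--     runs = letters.translate(_TABLE).split()
--     return len(s) + 2 * len(runs) - (1 if letters[-1:].isupper() else 0)
-- ===== Notes on version B (the rewrite author's own statement) =====
-- stated objective: alternative
-- what changed: Replaces the stateful transition-tracking loop by a run-counting pipeline: drop non-letters, blank out lowercase letters via str.translate, split on the blanks, and return len(s) + 2*(number of uppercase runs) minus 1 if the last letter is uppercase.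
import Mathlib
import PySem

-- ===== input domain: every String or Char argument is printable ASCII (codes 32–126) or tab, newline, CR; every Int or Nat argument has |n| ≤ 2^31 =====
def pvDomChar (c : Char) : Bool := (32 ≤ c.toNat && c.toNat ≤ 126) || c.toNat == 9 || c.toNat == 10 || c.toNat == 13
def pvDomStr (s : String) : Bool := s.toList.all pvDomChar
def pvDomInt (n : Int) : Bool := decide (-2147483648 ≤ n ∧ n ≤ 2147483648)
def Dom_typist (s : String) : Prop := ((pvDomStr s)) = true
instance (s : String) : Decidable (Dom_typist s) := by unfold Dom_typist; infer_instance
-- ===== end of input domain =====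

-- B replaces A's stateful transition-tracking loop by a run-counting pipeline
-- (blank out lowercase letters, split, count runs, closed-form toggle count);
-- alternative decomposition, same asymptotic cost.

-- ===== PORT A =====
def typistStep (st : Bool × Int) (l : Char) : Bool × Int :=
  if PySem.Chars.isupper l && !st.1 then (true, st.2 + 1)
  else if PySem.Chars.islower l && st.1 then (false, st.2 + 1)
  else st

def typist (s : String) : Int :=
  (s.toList.foldl typistStep (false, PySem.Str.len s)).2

-- ===== PORT B =====
-- letters = ''.join(filter(str.isalpha, s))
-- runs = letters.translate(_TABLE).split()   -- _TABLE sends 'a'..'z' to ' '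
-- return len(s) + 2 * len(runs) - (1 if letters[-1:].isupper() else 0)
-- (the translate table is ported as the map it denotes: lowercase ↦ ' ', others
--  unchanged — exact on the ASCII domain the table covers)
def typistLetters (s : String) : List Char :=
  s.toList.filter PySem.Chars.isalpha

def typist_alt (s : String) : Int :=
  PySem.Str.len s +
    2 * ((PySem.Chars.split₀
        ((typistLetters s).map (fun c => if PySem.Chars.islower c then ' ' else c))).length : Int) -
    (if (match (typistLetters s).getLast? with
         | some c => PySem.Chars.isupper c
         | none => false) then 1 else 0)

-- ===== PRECONDITION & SPEC =====
def Spec_typist (s : String) (out : Int) : Prop := out = typist_alt s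
instance (s : String) (out : Int) : Decidable (Spec_typist s out) := by unfold Spec_typist; infer_instance

-- ===== CLAIM (what is proved, stated in full; the proofs are below) =====
def Claim_equal_typist : Prop := ∀ (s : String), Dom_typist s → Spec_typist s (typist s)

-- ===== LEMMAS AND PROOFS =====

-- toggle count as adjacent-difference sum over the case flags (A's loop shape)
def countDiff : Bool → List Bool → Int
  | _, [] => 0
  | a, b :: bs => (if a != b then 1 else 0) + countDiff b bs

-- word count of a flag sequence (true = in-word character), given whether a
-- word is currently open (B's split shape)
def wordCount : Bool → List Bool → Nat
  | inw, [] => if inw then 1 else 0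
  | inw, b :: bs => if b then wordCount true bs else (if inw then 1 else 0) + wordCount false bs

lemma upper_not_lower {c : Char} (h : PySem.Chars.isupper c = true) :
    PySem.Chars.islower c = false := by
  revert h
  simp [PySem.Chars.isupper, PySem.Chars.islower, Char.le_def, UInt32.le_iff_toNat_le]
  intro h1 h2
  omega

lemma lower_not_upper {c : Char} (h : PySem.Chars.islower c = true) :
    PySem.Chars.isupper c = false := by
  revert h
  simp [PySem.Chars.isupper, PySem.Chars.islower, Char.le_def, UInt32.le_iff_toNat_le]
  intro h1 h2
  omega

lemma upper_not_space {c : Char} (h : PySem.Chars.isupper c = true) :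
    PySem.Chars.isspace c = false := by
  revert h
  simp [PySem.Chars.isupper, PySem.Chars.isspace, Char.le_def, UInt32.le_iff_toNat_le]
  intro h1 h2
  omega

-- A's fold computes k + countDiff over the case flags of the letters
lemma fold_eq_countDiff (cs : List Char) : ∀ (u : Bool) (k : Int),
    (cs.foldl typistStep (u, k)).2 =
      k + countDiff u ((cs.filter PySem.Chars.isalpha).map PySem.Chars.isupper) := by
  induction cs with
  | nil => intro u k; simp [countDiff]
  | cons c cs ih =>
    intro u k
    by_cases hu : PySem.Chars.isupper c = true
    · have hl := upper_not_lower hu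
      have ha : PySem.Chars.isalpha c = true := by
        simp [PySem.Chars.isalpha, hu]
      cases u with
      | false =>
        simp [typistStep, hu, ha, countDiff, ih]
        ring
      | true =>
        simp [typistStep, hu, hl, ha, countDiff, ih]
    · by_cases hl : PySem.Chars.islower c = true
      · have ha : PySem.Chars.isalpha c = true := by
          simp [PySem.Chars.isalpha, hl]
        cases u with
        | false =>
          simp [typistStep, hu, hl, ha, countDiff, ih]
        | true =>
          simp [typistStep, hu, hl, ha, countDiff, ih]
          ring
      · have hu' : PySem.Chars.isupper c = false := by simpa using hu
        have hl' : PySem.Chars.islower c = false := by simpa using hl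
        have ha : PySem.Chars.isalpha c = false := by
          simp [PySem.Chars.isalpha, hu', hl']
        simp [typistStep, hu', hl', ha, ih]

-- split₀.go produces acc.length + wordCount of the nonspace pattern
lemma go_length (t : List Char) : ∀ (cur : List Char) (acc : List (List Char)),
    (PySem.Chars.split₀.go t cur acc).length =
      acc.length + wordCount (!cur.isEmpty) (t.map (fun c => !PySem.Chars.isspace c)) := by
  induction t with
  | nil =>
    intro cur acc
    cases cur <;> simp [PySem.Chars.split₀.go, wordCount]
  | cons c rest ih =>
    intro cur acc
    by_cases hs : PySem.Chars.isspace c = true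
    · cases cur with
      | nil => simp [PySem.Chars.split₀.go, hs, wordCount, ih]
      | cons x xs =>
        simp [PySem.Chars.split₀.go, hs, wordCount, ih]
        omega
    · have hs' : PySem.Chars.isspace c = false := by simpa using hs
      cases cur <;> simp [PySem.Chars.split₀.go, hs', wordCount, ih]

lemma split₀_length (t : List Char) :
    (PySem.Chars.split₀ t).length = wordCount false (t.map (fun c => !PySem.Chars.isspace c)) := by
  simpa using go_length t [] []

-- the translated letters' nonspace pattern is exactly the case-flag list
lemma pattern_eq (cs : List Char) :
    ((cs.filter PySem.Chars.isalpha).map (fun c => if PySem.Chars.islower c then ' ' else c)).map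
        (fun c => !PySem.Chars.isspace c) =
      (cs.filter PySem.Chars.isalpha).map PySem.Chars.isupper := by
  rw [List.map_map]
  apply List.map_congr_left
  intro c hc
  have ha : PySem.Chars.isalpha c = true := (List.mem_filter.mp hc).2
  by_cases hl : PySem.Chars.islower c = true
  · have := lower_not_upper hl
    simp [hl, this, PySem.Chars.isspace]
  · have hu : PySem.Chars.isupper c = true := by
      have := ha
      simp [PySem.Chars.isalpha] at this
      tauto
    simp [hl, hu, upper_not_space hu]

-- closed form: countDiff from state u equals 2·wordCount minus boundary terms
lemma countDiff_closed (f : List Bool) : ∀ (u : Bool),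
    countDiff u f =
      2 * (wordCount u f : Int) - (if u then 1 else 0) -
        (if f.getLast?.getD u then 1 else 0) := by
  induction f with
  | nil => intro u; cases u <;> simp [countDiff, wordCount]
  | cons b bs ih =>
    intro u
    have hlast : (b :: bs).getLast?.getD u = bs.getLast?.getD b := by
      cases bs with
      | nil => simp
      | cons x xs =>
        obtain ⟨a, ha⟩ := Option.isSome_iff_exists.mp (List.getLast?_isSome.mpr (by simp) :
          (x :: xs).getLast?.isSome)
        simp [List.getLast?_cons_cons, ha]
    rw [hlast]
    cases b with
    | true =>
      cases u <;> (simp [countDiff, wordCount, ih true]; try ring)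
    | false =>
      cases u <;> (simp [countDiff, wordCount, ih false]; try ring)

-- ===== VERDICT (by name: the statement is the Claim_ definition above) =====
theorem typist_spec : Claim_equal_typist := by
  intro s _
  unfold Spec_typist typist typist_alt typistLetters
  rw [fold_eq_countDiff]
  rw [split₀_length, pattern_eq, countDiff_closed]
  have hlast : ((s.toList.filter PySem.Chars.isalpha).map PySem.Chars.isupper).getLast?.getD false =
      (match (s.toList.filter PySem.Chars.isalpha).getLast? with
       | some c => PySem.Chars.isupper c
       | none => false) := by
    rw [List.getLast?_map]
    cases (s.toList.filter PySem.Chars.isalpha).getLast? <;> simp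
  rw [hlast]
  simp
  ring
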